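-- pv_equiv track=rewrite | github.com/tifleadenisa/CryptographyExercises | Reed-Solomon/main.py | compute_m
-- ===== SOURCE A (Python) =====
-- def to_binary(a):
--     m = ""
--     for i in a:
--         m += ((bin(ord(i))[2:]).zfill(8))
--     return m
--
-- def compute_m(message, p):
--     chunks = [message[i:i + 20] for i in range(0, len(message), 20)]
--     numbers = []
--     poly = []
--     for chunk in chunks:
--         numbers.append(to_binary(chunk))
--     for number in numbers:
--         poly.append(int(number, 2) % p)
--     return poly
-- ===== SOURCE B (Python) =====
-- def compute_m(message, p):
--     # One numeric pass per 20-char chunk: fold chars into an integer base 256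
--     # (exact for characters below 256, which covers the stated ASCII domain).
--     poly = []
--     for i in range(0, len(message), 20):
--         n = 0
--         for c in message[i:i + 20]:
--             n = n * 256 + ord(c)
--         poly.append(n % p)
--     return poly
-- ===== Notes on version B (the rewrite author's own statement) =====
-- stated objective: simpler
-- what changed: Replaces the binary-string construction (to_binary with bin/zfill) plus two follow-up list passes by a single pass that folds each 20-char chunk's characters into an integer base 256 directly, never forming or re-parsing a bit string.
import Mathlib
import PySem

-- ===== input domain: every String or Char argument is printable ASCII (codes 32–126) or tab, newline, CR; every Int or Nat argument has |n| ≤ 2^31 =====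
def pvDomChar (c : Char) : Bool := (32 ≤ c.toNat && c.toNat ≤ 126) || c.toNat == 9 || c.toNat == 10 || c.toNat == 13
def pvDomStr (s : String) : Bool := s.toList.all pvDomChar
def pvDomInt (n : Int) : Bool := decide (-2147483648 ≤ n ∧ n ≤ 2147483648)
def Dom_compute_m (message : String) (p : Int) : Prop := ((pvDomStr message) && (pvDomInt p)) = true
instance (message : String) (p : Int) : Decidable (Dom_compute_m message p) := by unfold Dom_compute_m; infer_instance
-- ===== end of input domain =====

-- B replaces A's bit-string building and re-parsing by one numeric base-256 fold per chunk (objective: simpler).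

-- ===== PORT A =====
-- bin(ord(i))[2:].zfill(8), as a function of the code point (PySem primitives throughout)
def pvBlock (n : Nat) : List Char :=
  PySem.Chars.zfill (PySem.List.slice (PySem.Int.toBinChars0b (n : Int)) (some 2) none) 8

def to_binary (a : List Char) : List Char :=
  a.foldl (fun m i => m ++ pvBlock i.toNat) []

-- int(number, 2): ported by hand; exact on nonempty strings of '0'/'1' digits,
-- which is all compute_m ever feeds it (to_binary outputs).
def pvIntBase2 (cs : List Char) : Int :=
  cs.foldl (fun acc c => 2 * acc + (if c = '1' then 1 else 0)) 0

def compute_m (message : String) (p : Int) : List Int :=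
  let ms := message.toList
  let chunks := (PySem.List.pyRange 0 ms.length 20).map
    (fun i => PySem.List.slice ms (some i) (some (i + 20)))
  let numbers := chunks.foldl (fun ns chunk => ns ++ [to_binary chunk]) []
  numbers.foldl (fun poly number => poly ++ [PySem.Int.mod (pvIntBase2 number) p]) []

-- ===== PORT B =====
def compute_m_alt (message : String) (p : Int) : List Int :=
  let ms := message.toList
  (PySem.List.pyRange 0 ms.length 20).foldl (fun poly i =>
    let n := (PySem.List.slice ms (some i) (some (i + 20))).foldl
      (fun n c => n * 256 + (c.toNat : Int)) 0
    poly ++ [PySem.Int.mod n p]) []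

-- ===== PRECONDITION & SPEC =====
-- Pre_ excludes exactly the inputs where A raises: a nonempty message with p = 0 hits '% 0' (ZeroDivisionError).
def Pre_compute_m (message : String) (p : Int) : Prop := message = "" ∨ p ≠ 0
instance (message : String) (p : Int) : Decidable (Pre_compute_m message p) := by unfold Pre_compute_m; infer_instance
def pvWitness_compute_m : String × Int := ("Hello, world!", 929)

def Spec_compute_m (message : String) (p : Int) (out : List Int) : Prop := out = compute_m_alt message p
instance (message : String) (p : Int) (out : List Int) : Decidable (Spec_compute_m message p out) := by unfold Spec_compute_m; infer_instance

-- ===== CLAIM (what is proved, stated in full; the proofs are below) =====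
def Claim_equal_compute_m : Prop := ∀ (message : String) (p : Int), Dom_compute_m message p → Pre_compute_m message p → Spec_compute_m message p (compute_m message p)

-- ===== LEMMAS AND PROOFS =====

theorem pv_foldl_append {α β : Type} (f : α → β) :
    ∀ (l : List α) (init : List β),
      l.foldl (fun acc x => acc ++ [f x]) init = init ++ l.map f := by
  intro l
  induction l with
  | nil => intro init; simp
  | cons x xs ih => intro init; simp [List.foldl, ih]

def pvIsBit (c : Char) : Bool := c = '0' || c = '1'

theorem pv_bits_shift :
    ∀ (bs : List Char) (acc : Int), bs.all pvIsBit = true →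
      bs.foldl (fun acc c => 2 * acc + (if c = '1' then 1 else 0)) acc
        = acc * 2 ^ bs.length
          + bs.foldl (fun acc c => 2 * acc + (if c = '1' then 1 else 0)) 0 := by
  intro bs
  induction bs with
  | nil => intro acc _; simp
  | cons b rest ih =>
    intro acc h
    simp only [List.all_cons, Bool.and_eq_true] at h
    simp only [List.foldl_cons, List.length_cons]
    rw [ih _ h.2, ih (2 * 0 + (if b = '1' then 1 else 0)) h.2]
    ring

set_option maxRecDepth 8192 in
theorem pv_block_fact : ∀ n : Fin 128,
    (pvBlock n.val).all pvIsBit = true ∧ (pvBlock n.val).length = 8 ∧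
      (pvBlock n.val).foldl (fun acc c => 2 * acc + (if c = '1' then 1 else 0)) 0 = (n.val : Int) := by
  decide

theorem pv_block_foldl (c : Char) (hc : pvDomChar c = true) (acc : Int) :
    (pvBlock c.toNat).foldl (fun acc c => 2 * acc + (if c = '1' then 1 else 0)) acc
      = 256 * acc + (c.toNat : Int) := by
  have hlt : c.toNat < 128 := by
    simp [pvDomChar] at hc
    omega
  have h := pv_block_fact ⟨c.toNat, hlt⟩
  rw [pv_bits_shift _ _ h.1, h.2.1, h.2.2]
  push_cast [Fin.val_mk]
  ring

theorem pv_chunk_eq :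
    ∀ (ch : List Char) (acc : Int), (∀ c ∈ ch, pvDomChar c = true) →
      (ch.foldl (fun m i => m ++ pvBlock i.toNat) []).foldl
          (fun acc c => 2 * acc + (if c = '1' then 1 else 0)) acc
        = ch.foldl (fun n c => n * 256 + (c.toNat : Int)) acc := by
  have flat : ∀ (ch : List Char) (m0 : List Char),
      ch.foldl (fun m i => m ++ pvBlock i.toNat) m0 = m0 ++ ch.flatMap (fun i => pvBlock i.toNat) := by
    intro ch
    induction ch with
    | nil => intro m0; simp
    | cons x xs ih => intro m0; simp [List.foldl, ih]
  intro ch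
  induction ch with
  | nil => intro acc _; simp
  | cons x xs ih =>
    intro acc h
    rw [flat]
    simp only [List.nil_append, List.flatMap_cons, List.foldl_append]
    rw [pv_block_foldl x (h x (by simp)) acc]
    have := ih (256 * acc + (x.toNat : Int)) (fun c hc => h c (by simp [hc]))
    rw [flat, List.nil_append] at this
    rw [this]
    simp only [List.foldl_cons]
    ring_nf

-- ===== VERDICT (by name: the statement is the Claim_ definition above) =====
theorem compute_m_spec : Claim_equal_compute_m := by
  intro message p hdom _
  unfold Spec_compute_m compute_m compute_m_alt
  simp only [pv_foldl_append, List.nil_append, List.map_map]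
  apply List.map_congr_left
  intro i _
  simp only [Function.comp]
  unfold pvIntBase2 to_binary
  rw [pv_chunk_eq]
  intro c hc
  have hmem : c ∈ message.toList := PySem.List.mem_of_mem_slice _ _ _ hc
  simp only [Dom_compute_m, pvDomStr, Bool.and_eq_true, List.all_eq_true] at hdom
  exact hdom.1 c hmem
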